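-- pv_equiv track=rewrite | github.com/dplocki/aquaQ-challenge | solutions/challenge36.py | recalculate_restriction
-- ===== SOURCE A (Python) =====
-- from typing import Generator, List, Set, Tuple
--
-- def recalculate_restriction(
--     grid_numbers: List[int], composite_numbers: List[int]
-- ) -> Generator[Tuple[int, int], None, None]:
--     minium_limit = 0
--     limiter = None
--
--     for item in composite_numbers:
--         if item == None:
--             if limiter == None:
--                 limiter = [minium_limit, None]
--         else:
--             minium_limit = item
--             if limiter != None:
--                 limiter[1] = item
--                 yield limiter
--                 limiter = None
--
--     if limiter != None:
--         limiter[1] = max(grid_numbers) - 1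
--         yield limiter
-- ===== SOURCE B (Python) =====
-- def recalculate_restriction(grid_numbers, composite_numbers):
--     # Two-level scan: on hitting a None, skip the whole run with an inner loop,
--     # then emit the interval [last value before run, first value after run]
--     # (or [last, max(grid_numbers)-1] for a trailing run).
--     last = 0
--     i, n = 0, len(composite_numbers)
--     while i < n:
--         item = composite_numbers[i]
--         if item is None:
--             j = i
--             while j < n and composite_numbers[j] is None:
--                 j += 1
--             if j < n:
--                 nxt = composite_numbers[j]
--                 yield [last, nxt]
--                 last = nxt
--                 i = j + 1
--             else:
--                 yield [last, max(grid_numbers) - 1]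
--                 i = j
--         else:
--             last = item
--             i += 1
-- ===== Notes on version B (the rewrite author's own statement) =====
-- stated objective: alternative
-- what changed: Replaces A's single pass with a limiter/flag state machine by a two-level scan that skips each whole run of Nones with an inner loop and emits the interval directly from the values around the run.
import Mathlib
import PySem

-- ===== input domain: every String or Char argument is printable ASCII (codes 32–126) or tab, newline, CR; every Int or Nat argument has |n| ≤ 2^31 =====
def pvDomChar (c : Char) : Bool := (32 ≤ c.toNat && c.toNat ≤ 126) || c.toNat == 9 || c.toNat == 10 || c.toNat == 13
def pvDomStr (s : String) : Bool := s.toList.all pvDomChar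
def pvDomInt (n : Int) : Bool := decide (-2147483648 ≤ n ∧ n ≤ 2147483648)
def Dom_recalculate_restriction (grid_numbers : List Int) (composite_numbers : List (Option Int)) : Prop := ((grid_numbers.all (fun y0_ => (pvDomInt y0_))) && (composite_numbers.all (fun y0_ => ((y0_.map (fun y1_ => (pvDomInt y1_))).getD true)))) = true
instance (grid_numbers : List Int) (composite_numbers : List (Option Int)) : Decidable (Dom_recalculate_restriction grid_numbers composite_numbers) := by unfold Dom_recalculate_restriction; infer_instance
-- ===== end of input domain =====

-- B is an alternative O(n) decomposition (run-skipping two-level scan instead of A's flag state machine); return values only (A yields lazily).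

-- ===== PORT A =====
-- One foldl step per item of composite_numbers, state (minium_limit, limiter, yielded so far);
-- 'limiter = some l' stands for Python's list [l, None].
def pvStepA (st : Int × Option Int × List (Int × Int)) (item : Option Int) :
    Int × Option Int × List (Int × Int) :=
  match item with
  | none =>
      match st.2.1 with
      | none => (st.1, some st.1, st.2.2)
      | some _ => st
  | some v =>
      match st.2.1 with
      | none => (v, none, st.2.2)
      | some l => (v, none, st.2.2 ++ [(l, v)])

def recalculate_restriction (grid_numbers : List Int) (composite_numbers : List (Option Int)) : List (Int × Int) :=
  let r := composite_numbers.foldl pvStepA (0, none, [])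
  match r.2.1 with
  | none => r.2.2
  | some l => r.2.2 ++ [(l, (PySem.List.max? grid_numbers (fun y => y)).getD 0 - 1)]

-- ===== PORT B =====
-- Outer loop = structural recursion; the inner 'while ... is None: j += 1' = dropWhile.
def pvRunB (grid_numbers : List Int) (last : Int) : List (Option Int) → List (Int × Int)
  | [] => []
  | some v :: rest => pvRunB grid_numbers v rest
  | none :: rest =>
      match h : rest.dropWhile Option.isNone with
      | some v :: tail => (last, v) :: pvRunB grid_numbers v tail
      | _ => [(last, (PySem.List.max? grid_numbers (fun y => y)).getD 0 - 1)]
termination_by cs => cs.length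
decreasing_by
  · simp
  · have h1 : (rest.dropWhile Option.isNone).length ≤ rest.length := rest.length_dropWhile_le _
    rw [h] at h1
    simp at h1 ⊢
    omega

def recalculate_restriction_alt (grid_numbers : List Int) (composite_numbers : List (Option Int)) : List (Int × Int) :=
  pvRunB grid_numbers 0 composite_numbers

-- ===== PRECONDITION & SPEC =====
-- Pre_ excludes exactly the inputs where Python A raises ValueError (max of an empty
-- grid_numbers list, reached iff composite_numbers ends in a None); B raises there too.
def Pre_recalculate_restriction (grid_numbers : List Int) (composite_numbers : List (Option Int)) : Prop :=
  composite_numbers.getLast? = some none → grid_numbers ≠ []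

instance (grid_numbers : List Int) (composite_numbers : List (Option Int)) : Decidable (Pre_recalculate_restriction grid_numbers composite_numbers) := by unfold Pre_recalculate_restriction; infer_instance

def pvWitness_recalculate_restriction : List Int × List (Option Int) := ([5, 9], [some 2, none, some 4, none])

def Spec_recalculate_restriction (grid_numbers : List Int) (composite_numbers : List (Option Int)) (out : List (Int × Int)) : Prop := out = recalculate_restriction_alt grid_numbers composite_numbers
instance (grid_numbers : List Int) (composite_numbers : List (Option Int)) (out : List (Int × Int)) : Decidable (Spec_recalculate_restriction grid_numbers composite_numbers out) := by unfold Spec_recalculate_restriction; infer_instance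

-- ===== CLAIM (what is proved, stated in full; the proofs are below) =====
def Claim_equal_recalculate_restriction : Prop := ∀ (grid_numbers : List Int) (composite_numbers : List (Option Int)), Dom_recalculate_restriction grid_numbers composite_numbers → Pre_recalculate_restriction grid_numbers composite_numbers → Spec_recalculate_restriction grid_numbers composite_numbers (recalculate_restriction grid_numbers composite_numbers)

-- ===== LEMMAS AND PROOFS =====

-- A recursive restatement of A's fold (emitted intervals only).
def pvGoA (M m : Int) (lim : Option Int) : List (Option Int) → List (Int × Int)
  | [] => match lim with
          | none => []
          | some l => [(l, M - 1)]
  | none :: rest =>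
      match lim with
      | none => pvGoA M m (some m) rest
      | some _ => pvGoA M m lim rest
  | some v :: rest =>
      match lim with
      | none => pvGoA M v none rest
      | some l => (l, v) :: pvGoA M v none rest

theorem pvFoldA_eq (M : Int) :
    ∀ (cs : List (Option Int)) (m : Int) (lim : Option Int) (acc : List (Int × Int)),
    (let r := cs.foldl pvStepA (m, lim, acc)
     match r.2.1 with
     | none => r.2.2
     | some l => r.2.2 ++ [(l, M - 1)]) = acc ++ pvGoA M m lim cs := by
  intro cs
  induction cs with
  | nil =>
      intro m lim acc
      cases lim <;> simp [pvGoA]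
  | cons x rest ih =>
      intro m lim acc
      cases x with
      | none =>
          cases lim with
          | none => simpa [List.foldl, pvStepA, pvGoA] using ih m (some m) acc
          | some l => simpa [List.foldl, pvStepA, pvGoA] using ih m (some l) acc
      | some v =>
          cases lim with
          | none => simpa [List.foldl, pvStepA, pvGoA] using ih v none acc
          | some l =>
              have := ih v none (acc ++ [(l, v)])
              simpa [List.foldl, pvStepA, pvGoA] using this

-- Once the limiter is armed, A just skips the rest of the None-run.
theorem pvGoA_armed (M : Int) :
    ∀ (cs : List (Option Int)) (m l : Int),
    pvGoA M m (some l) cs =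
      (match cs.dropWhile Option.isNone with
       | some v :: tail => (l, v) :: pvGoA M v none tail
       | _ => [(l, M - 1)]) := by
  intro cs
  induction cs with
  | nil => intro m l; simp [pvGoA, List.dropWhile]
  | cons x rest ih =>
      intro m l
      cases x with
      | none => simpa [pvGoA, List.dropWhile] using ih m l
      | some v => simp [pvGoA, List.dropWhile]

theorem pvGoA_eq_runB (gs : List Int) :
    ∀ (n : Nat) (cs : List (Option Int)), cs.length ≤ n → ∀ (m : Int),
    pvGoA ((PySem.List.max? gs (fun y => y)).getD 0) m none cs = pvRunB gs m cs := by
  intro n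
  induction n with
  | zero =>
      intro cs h m
      have : cs = [] := List.length_eq_zero_iff.mp (Nat.le_zero.mp h)
      subst this
      simp [pvGoA, pvRunB]
  | succ n ih =>
      intro cs h m
      cases cs with
      | nil => simp [pvGoA, pvRunB]
      | cons x rest =>
          cases x with
          | some v =>
              have := ih rest (by simpa using Nat.lt_succ_iff.mp (by simpa using h)) v
              simpa [pvGoA, pvRunB] using this
          | none =>
              rw [show pvGoA ((PySem.List.max? gs (fun y => y)).getD 0) m none (none :: rest)
                    = pvGoA ((PySem.List.max? gs (fun y => y)).getD 0) m (some m) rest from rfl]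
              rw [pvGoA_armed]
              rw [pvRunB]
              cases hdw : rest.dropWhile Option.isNone with
              | nil => simp
              | cons y tail =>
                  cases y with
                  | none =>
                      exfalso
                      have hne : rest.dropWhile Option.isNone ≠ [] := by simp [hdw]
                      have hh := List.head_dropWhile_not Option.isNone hne
                      simp [hdw] at hh
                  | some v =>
                      have hlen : tail.length ≤ n := by
                        have h1 : (rest.dropWhile Option.isNone).length ≤ rest.length :=
                          rest.length_dropWhile_le _
                        rw [hdw] at h1
                        have h2 : rest.length ≤ n := by simpa using Nat.lt_succ_iff.mp (by simpa using h)
                        simp at h1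
                        omega
                      simp [ih tail hlen v]

-- ===== VERDICT (by name: the statement is the Claim_ definition above) =====
theorem recalculate_restriction_spec : Claim_equal_recalculate_restriction := by
  intro gs cs _ _
  unfold Spec_recalculate_restriction recalculate_restriction recalculate_restriction_alt
  rw [pvFoldA_eq ((PySem.List.max? gs (fun y => y)).getD 0) cs 0 none []]
  simpa using pvGoA_eq_runB gs cs.length cs le_rfl 0
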